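-- pv_equiv track=rewrite | github.com/CorvaeOboro/ultima_online_razor_enhanced_python_scripts | scripts/RITUAL_circles_expanded_uor_brit.py | get_grid_points
-- ===== SOURCE A (Python) =====
-- def get_grid_points(center_x, center_y, radius=4):
--     """Generate all valid grid points within the ritual area."""
--     points = set()
--     # Only generate points within the diamond shape of the ritual
--     for x in range(center_x - radius, center_x + radius + 1):
--         for y in range(center_y - radius, center_y + radius + 1):
--             # Check if point is within diamond shape and not too close to center
--             manhattan_dist = abs(x - center_x) + abs(y - center_y)
--             if manhattan_dist <= radius and manhattan_dist > 1:  # Exclude center and immediate adjacents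
--                 points.add((x, y))
--     return points
-- ===== SOURCE B (Python) =====
-- def get_grid_points(center_x, center_y, radius=4):
--     """Generate all valid grid points within the ritual area."""
--     points = []
--     for dx in range(-radius, radius + 1):
--         rem = radius - abs(dx)
--         if abs(dx) >= 2:
--             ys = range(-rem, rem + 1)
--         elif abs(dx) == 1:
--             ys = [dy for dy in range(-rem, rem + 1) if dy != 0]
--         else:
--             ys = list(range(-rem, -1)) + list(range(2, rem + 1))
--         for dy in ys:
--             points.append((center_x + dx, center_y + dy))
--     return set(points)
-- ===== Notes on version B (the rewrite author's own statement) =====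
-- stated objective: alternative
-- what changed: B replaces A's scan of the whole (2r+1)x(2r+1) bounding box with a per-point Manhattan-distance filter by directly generating, for each column dx, the closed-form ranges of valid dy (full range for |dx|>=2, range minus 0 for |dx|=1, two outer ranges for dx=0), so only kept points are ever produced.
import Mathlib
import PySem

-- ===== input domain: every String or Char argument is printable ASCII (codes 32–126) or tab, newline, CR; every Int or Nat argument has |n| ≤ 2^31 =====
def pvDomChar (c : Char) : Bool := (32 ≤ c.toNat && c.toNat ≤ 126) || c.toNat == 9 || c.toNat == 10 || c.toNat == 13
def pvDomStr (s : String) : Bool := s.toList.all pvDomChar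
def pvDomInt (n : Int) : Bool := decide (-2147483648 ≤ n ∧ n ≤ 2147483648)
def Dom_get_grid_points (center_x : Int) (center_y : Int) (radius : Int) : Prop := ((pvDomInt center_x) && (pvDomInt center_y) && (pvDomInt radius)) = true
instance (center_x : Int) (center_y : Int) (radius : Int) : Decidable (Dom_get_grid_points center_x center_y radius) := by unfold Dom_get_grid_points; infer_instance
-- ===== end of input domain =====

-- B replaces A's full-box scan with a Manhattan-distance filter by per-column closed-form
-- y-ranges (objective: alternative decomposition; only the kept points are ever generated).

-- ===== PORT A =====
-- A: scan the whole (2r+1)×(2r+1) box, keep points with 1 < manhattan ≤ r, into a set.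
def get_grid_points (center_x : Int) (center_y : Int) (radius : Int) : List (Int × Int) :=
  (PySem.List.pyRange (center_x - radius) (center_x + radius + 1) 1).foldl
    (fun pts x =>
      (PySem.List.pyRange (center_y - radius) (center_y + radius + 1) 1).foldl
        (fun pts y =>
          let manhattan_dist : Int := |x - center_x| + |y - center_y|
          if manhattan_dist ≤ radius ∧ manhattan_dist > 1 then PySem.Set.add pts (x, y)
          else pts)
        pts)
    PySem.Set.empty

-- ===== PORT B =====
-- B: for each column dx, the valid dy form explicit ranges; append them, then set(points).
def get_grid_points_alt (center_x : Int) (center_y : Int) (radius : Int) : List (Int × Int) :=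
  PySem.Set.ofList <|
    (PySem.List.pyRange (-radius) (radius + 1) 1).foldl
      (fun pts dx =>
        let rem : Int := radius - |dx|
        let ys : List Int :=
          if |dx| ≥ 2 then PySem.List.pyRange (-rem) (rem + 1) 1
          else if |dx| = 1 then
            (PySem.List.pyRange (-rem) (rem + 1) 1).filter (fun dy => dy ≠ 0)
          else PySem.List.pyRange (-rem) (-1) 1 ++ PySem.List.pyRange 2 (rem + 1) 1
        pts ++ ys.map (fun dy => (center_x + dx, center_y + dy)))
      []

-- ===== PRECONDITION & SPEC =====
def Spec_get_grid_points (center_x : Int) (center_y : Int) (radius : Int) (out : List (Int × Int)) : Prop := out = get_grid_points_alt center_x center_y radius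
instance (center_x : Int) (center_y : Int) (radius : Int) (out : List (Int × Int)) : Decidable (Spec_get_grid_points center_x center_y radius out) := by unfold Spec_get_grid_points; infer_instance

-- ===== CLAIM (what is proved, stated in full; the proofs are below) =====
def Claim_equal_get_grid_points : Prop := ∀ (center_x : Int) (center_y : Int) (radius : Int), Dom_get_grid_points center_x center_y radius → Spec_get_grid_points center_x center_y radius (get_grid_points center_x center_y radius)

-- ===== LEMMAS AND PROOFS =====

-- A's inner loop: conditional Set.add over fresh points is append-of-filter.
theorem inner_foldl_add (x : Int) (p : Int → Prop) [DecidablePred p]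
    (ys : List Int) (hys : ys.Nodup) (acc : List (Int × Int))
    (hacc : ∀ y ∈ ys, (x, y) ∉ acc) :
    ys.foldl (fun pts y => if p y then PySem.Set.add pts (x, y) else pts) acc
      = acc ++ (ys.filter (fun y => decide (p y))).map (fun y => (x, y)) := by
  induction ys generalizing acc with
  | nil => simp
  | cons y t ih =>
    simp only [List.foldl_cons, List.filter_cons]
    by_cases hp : p y
    · rw [if_pos hp, PySem.Set.add_of_not_mem (hacc y (by simp))]
      rw [ih hys.of_cons (acc ++ [(x, y)]) ?_]
      · simp [hp]
      · intro y' hy'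
        have : y' ≠ y := fun h => (List.nodup_cons.mp hys).1 (h ▸ hy')
        simp [hacc y' (List.mem_cons_of_mem _ hy'), this]
    · rw [if_neg hp, ih hys.of_cons acc (fun y' hy' => hacc y' (List.mem_cons_of_mem _ hy'))]
      simp [hp]

-- A's outer loop over distinct x-values is a flatMap of the per-column filtered lists.
theorem outer_foldl_add (p : Int → Int → Prop) [∀ x, DecidablePred (p x)]
    (xs ys : List Int) (hxs : xs.Nodup) (hys : ys.Nodup) (acc : List (Int × Int))
    (hacc : ∀ x ∈ xs, ∀ y, (x, y) ∉ acc) :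
    xs.foldl (fun pts x =>
        ys.foldl (fun pts y => if p x y then PySem.Set.add pts (x, y) else pts) pts) acc
      = acc ++ xs.flatMap (fun x => (ys.filter (fun y => decide (p x y))).map (fun y => (x, y))) := by
  induction xs generalizing acc with
  | nil => simp
  | cons x t ih =>
    simp only [List.foldl_cons, List.flatMap_cons]
    rw [inner_foldl_add x (p x) ys hys acc (fun y hy => hacc x (by simp) y)]
    rw [ih hxs.of_cons (acc ++ _) ?_]
    · simp
    · intro x' hx' y
      have hne : x' ≠ x := fun h => (List.nodup_cons.mp hxs).1 (h ▸ hx')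
      simp only [List.mem_append, not_or]
      refine ⟨fun h => hacc x' (List.mem_cons_of_mem _ hx') y h, ?_⟩
      simp only [List.mem_map, not_exists, not_and]
      intro b _ hb
      exact absurd (congrArg Prod.fst hb).symm (by simpa using hne)

-- per-column equality: A's filtered dy-range equals B's closed-form ranges (m stands for |dx|).
theorem column_eq_core (r m : Int) (h0 : 0 ≤ m) (hr : m ≤ r) :
    (PySem.List.pyRange (-r) (r + 1) 1).filter
        (fun dy => decide (m + |dy| ≤ r ∧ m + |dy| > 1))
      = (if m ≥ 2 then PySem.List.pyRange (-(r - m)) ((r - m) + 1) 1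
          else if m = 1 then
            (PySem.List.pyRange (-(r - m)) ((r - m) + 1) 1).filter (fun dy => decide (dy ≠ 0))
          else PySem.List.pyRange (-(r - m)) (-1) 1 ++ PySem.List.pyRange 2 ((r - m) + 1) 1) := by
  split_ifs with hge2 heq1
  · rw [PySem.List.pyRange_one_append (-r) (-(r - m)) (r + 1) (by omega) (by omega),
        PySem.List.pyRange_one_append (-(r - m)) ((r - m) + 1) (r + 1) (by omega) (by omega),
        List.filter_append, List.filter_append]
    have e1 : (PySem.List.pyRange (-r) (-(r - m)) 1).filter
        (fun dy => decide (m + |dy| ≤ r ∧ m + |dy| > 1)) = [] := by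
      rw [List.filter_eq_nil_iff]
      intro a ha
      have hb := PySem.List.mem_pyRange_one.mp ha
      rcases abs_cases a with ⟨q, _⟩ | ⟨q, _⟩ <;> simp [q] <;> omega
    have e2 : (PySem.List.pyRange (-(r - m)) ((r - m) + 1) 1).filter
        (fun dy => decide (m + |dy| ≤ r ∧ m + |dy| > 1)) = PySem.List.pyRange (-(r - m)) ((r - m) + 1) 1 := by
      rw [List.filter_eq_self]
      intro a ha
      have hb := PySem.List.mem_pyRange_one.mp ha
      rcases abs_cases a with ⟨q, _⟩ | ⟨q, _⟩ <;> simp [q] <;> omega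
    have e3 : (PySem.List.pyRange ((r - m) + 1) (r + 1) 1).filter
        (fun dy => decide (m + |dy| ≤ r ∧ m + |dy| > 1)) = [] := by
      rw [List.filter_eq_nil_iff]
      intro a ha
      have hb := PySem.List.mem_pyRange_one.mp ha
      rcases abs_cases a with ⟨q, _⟩ | ⟨q, _⟩ <;> simp [q] <;> omega
    rw [e1, e2, e3]; simp
  · subst heq1
    rw [PySem.List.pyRange_one_append (-r) (-(r - 1)) (r + 1) (by omega) (by omega),
        PySem.List.pyRange_one_append (-(r - 1)) ((r - 1) + 1) (r + 1) (by omega) (by omega),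
        List.filter_append, List.filter_append]
    have e1 : (PySem.List.pyRange (-r) (-(r - 1)) 1).filter
        (fun dy => decide (1 + |dy| ≤ r ∧ 1 + |dy| > 1)) = [] := by
      rw [List.filter_eq_nil_iff]
      intro a ha
      have hb := PySem.List.mem_pyRange_one.mp ha
      rcases abs_cases a with ⟨q, _⟩ | ⟨q, _⟩ <;> simp [q] <;> omega
    have e2 : (PySem.List.pyRange (-(r - 1)) ((r - 1) + 1) 1).filter
        (fun dy => decide (1 + |dy| ≤ r ∧ 1 + |dy| > 1))
        = (PySem.List.pyRange (-(r - 1)) ((r - 1) + 1) 1).filter (fun dy => decide (dy ≠ 0)) := by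
      apply List.filter_congr
      intro a ha
      have hb := PySem.List.mem_pyRange_one.mp ha
      rcases abs_cases a with ⟨q, _⟩ | ⟨q, _⟩ <;> simp only [q, decide_eq_decide] <;>
        constructor <;> intro <;> omega
    have e3 : (PySem.List.pyRange ((r - 1) + 1) (r + 1) 1).filter
        (fun dy => decide (1 + |dy| ≤ r ∧ 1 + |dy| > 1)) = [] := by
      rw [List.filter_eq_nil_iff]
      intro a ha
      have hb := PySem.List.mem_pyRange_one.mp ha
      rcases abs_cases a with ⟨q, _⟩ | ⟨q, _⟩ <;> simp [q] <;> omega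
    rw [e1, e2, e3]; simp
  · have hm0 : m = 0 := by omega
    subst hm0
    by_cases hr1 : r ≤ 1
    · have eA : (PySem.List.pyRange (-r) (r + 1) 1).filter
          (fun dy => decide (0 + |dy| ≤ r ∧ 0 + |dy| > 1)) = [] := by
        rw [List.filter_eq_nil_iff]
        intro a ha
        have hb := PySem.List.mem_pyRange_one.mp ha
        rcases abs_cases a with ⟨q, _⟩ | ⟨q, _⟩ <;> simp [q] <;> omega
      rw [eA, PySem.List.pyRange_one_eq_nil (a := -(r - 0)) (b := -1) (by omega),
          PySem.List.pyRange_one_eq_nil (a := 2) (b := (r - 0) + 1) (by omega)]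
      simp
    · rw [PySem.List.pyRange_one_append (-r) (-1) (r + 1) (by omega) (by omega),
          PySem.List.pyRange_one_append (-1) 2 (r + 1) (by omega) (by omega),
          List.filter_append, List.filter_append]
      have e1 : (PySem.List.pyRange (-r) (-1) 1).filter
          (fun dy => decide (0 + |dy| ≤ r ∧ 0 + |dy| > 1)) = PySem.List.pyRange (-r) (-1) 1 := by
        rw [List.filter_eq_self]
        intro a ha
        have hb := PySem.List.mem_pyRange_one.mp ha
        rcases abs_cases a with ⟨q, _⟩ | ⟨q, _⟩ <;> simp [q] <;> omega
      have e2 : (PySem.List.pyRange (-1) 2 1).filter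
          (fun dy => decide (0 + |dy| ≤ r ∧ 0 + |dy| > 1)) = [] := by
        rw [List.filter_eq_nil_iff]
        intro a ha
        have hb := PySem.List.mem_pyRange_one.mp ha
        rcases abs_cases a with ⟨q, _⟩ | ⟨q, _⟩ <;> simp [q] <;> omega
      have e3 : (PySem.List.pyRange 2 (r + 1) 1).filter
          (fun dy => decide (0 + |dy| ≤ r ∧ 0 + |dy| > 1)) = PySem.List.pyRange 2 (r + 1) 1 := by
        rw [List.filter_eq_self]
        intro a ha
        have hb := PySem.List.mem_pyRange_one.mp ha
        rcases abs_cases a with ⟨q, _⟩ | ⟨q, _⟩ <;> simp [q] <;> omega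
      rw [e1, e2, e3]
      simp [sub_zero]

-- B's per-column list, named for the proofs.
def colB (r dx : Int) : List Int :=
  if |dx| ≥ 2 then PySem.List.pyRange (-(r - |dx|)) ((r - |dx|) + 1) 1
  else if |dx| = 1 then
    (PySem.List.pyRange (-(r - |dx|)) ((r - |dx|) + 1) 1).filter (fun dy => decide (dy ≠ 0))
  else PySem.List.pyRange (-(r - |dx|)) (-1) 1 ++ PySem.List.pyRange 2 ((r - |dx|) + 1) 1

theorem nodup_colB (r dx : Int) : (colB r dx).Nodup := by
  unfold colB
  split_ifs
  · exact PySem.List.nodup_pyRange_one _ _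
  · exact (PySem.List.nodup_pyRange_one _ _).filter _
  · rw [List.nodup_append]
    refine ⟨PySem.List.nodup_pyRange_one _ _, PySem.List.nodup_pyRange_one _ _, ?_⟩
    intro a ha b hb
    have h1 := PySem.List.mem_pyRange_one.mp ha
    have h2 := PySem.List.mem_pyRange_one.mp hb
    omega

-- a range shifted by a constant
theorem pyRange_shift (c a b : Int) :
    PySem.List.pyRange (c + a) (c + b) 1 = (PySem.List.pyRange a b 1).map (fun t => c + t) := by
  rw [PySem.List.pyRange_one, PySem.List.pyRange_one, List.map_map]
  have h : c + b - (c + a) = b - a := by ring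
  rw [h]
  apply List.map_congr_left
  intro k _
  simp [Function.comp]
  ring

theorem get_grid_points_spec : Claim_equal_get_grid_points := by
  intro cx cy r _
  show get_grid_points cx cy r = get_grid_points_alt cx cy r
  have hA : get_grid_points cx cy r
      = (PySem.List.pyRange (cx - r) (cx + r + 1) 1).flatMap (fun x =>
          ((PySem.List.pyRange (cy - r) (cy + r + 1) 1).filter
            (fun y => decide (|x - cx| + |y - cy| ≤ r ∧ |x - cx| + |y - cy| > 1))).map
            (fun y => (x, y))) := by
    unfold get_grid_points
    exact (outer_foldl_add (fun x y => |x - cx| + |y - cy| ≤ r ∧ |x - cx| + |y - cy| > 1)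
      _ _ (PySem.List.nodup_pyRange_one _ _) (PySem.List.nodup_pyRange_one _ _) []
      (by simp)).trans (List.nil_append _)
  have hB : get_grid_points_alt cx cy r
      = PySem.Set.ofList ((PySem.List.pyRange (-r) (r + 1) 1).flatMap
          (fun dx => (colB r dx).map (fun dy => (cx + dx, cy + dy)))) := by
    unfold get_grid_points_alt
    exact congrArg PySem.Set.ofList
      ((PySem.List.foldl_append_eq_flatMap
        (fun dx => (colB r dx).map (fun dy => (cx + dx, cy + dy)))
        (PySem.List.pyRange (-r) (r + 1) 1) []).trans (List.nil_append _))
  have hshift : PySem.List.pyRange (cx - r) (cx + r + 1) 1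
      = (PySem.List.pyRange (-r) (r + 1) 1).map (fun d => cx + d) := by
    have h1 : cx - r = cx + (-r) := by ring
    have h2 : cx + r + 1 = cx + (r + 1) := by ring
    rw [h1, h2, pyRange_shift]
  have hEq : (PySem.List.pyRange (cx - r) (cx + r + 1) 1).flatMap (fun x =>
        ((PySem.List.pyRange (cy - r) (cy + r + 1) 1).filter
          (fun y => decide (|x - cx| + |y - cy| ≤ r ∧ |x - cx| + |y - cy| > 1))).map
          (fun y => (x, y)))
      = (PySem.List.pyRange (-r) (r + 1) 1).flatMap
          (fun dx => (colB r dx).map (fun dy => (cx + dx, cy + dy))) := by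
    rw [hshift, List.flatMap_map]
    apply List.flatMap_congr
    intro dx hdx
    have hb := PySem.List.mem_pyRange_one.mp hdx
    have hyshift : PySem.List.pyRange (cy - r) (cy + r + 1) 1
        = (PySem.List.pyRange (-r) (r + 1) 1).map (fun d => cy + d) := by
      have h1 : cy - r = cy + (-r) := by ring
      have h2 : cy + r + 1 = cy + (r + 1) := by ring
      rw [h1, h2, pyRange_shift]
    rw [hyshift, List.filter_map, List.map_map]
    have hpred : ((fun y => decide (|cx + dx - cx| + |y - cy| ≤ r ∧ |cx + dx - cx| + |y - cy| > 1))
          ∘ (fun d => cy + d))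
        = fun dy => decide (|dx| + |dy| ≤ r ∧ |dx| + |dy| > 1) := by
      funext dy
      simp [Function.comp]
    rw [hpred, column_eq_core r |dx| (abs_nonneg dx) (abs_le.mpr ⟨by omega, by omega⟩)]
    rfl
  rw [hA, hB, hEq]
  rw [PySem.Set.ofList_eq_self_of_nodup]
  rw [List.nodup_flatMap]
  constructor
  · intro dx _
    apply List.Nodup.map ?_ (nodup_colB r dx)
    intro a b h
    have hsnd := congrArg Prod.snd h
    simp at hsnd
    omega
  · apply List.Pairwise.imp ?_ (PySem.List.pairwise_lt_pyRange_one (-r) (r + 1))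
    intro d1 d2 hlt p hp1 hp2
    simp only [List.mem_map] at hp1 hp2
    obtain ⟨a, _, ha⟩ := hp1
    obtain ⟨b, _, hb⟩ := hp2
    have h1 := congrArg Prod.fst ha
    have h2 := congrArg Prod.fst hb
    simp at h1 h2
    omega
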